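-- pv_equiv track=rewrite | github.com/1998x-stack/X-LeetCode | Python/2-Medium/00625._最小因式分解/00625._最小因式分解.py | minimum_factorization
-- ===== SOURCE A (Python) =====
-- def minimum_factorization(a: int) -> int:
--     """
--     对给定的整数进行最小因式分解，确保分解出的因子乘积形成的数值最小。
--
--     Args:
--     a (int): 需要因式分解的正整数。
--
--     Returns:
--     int: 最小的因式分解乘积数，或当无法分解时返回0。
--
--     示例:
--     >>> minimum_factorization(48)
--     68
--     >>> minimum_factorization(15)
--     35
--     >>> minimum_factorization(1)
--     1
--     """
--     if a == 1:
--         return 1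
--
--     # 从 9 到 2 试图分解 a
--     factors = []
--     for factor in range(9, 1, -1): # 注意是从9-2， 保证了很多
--         while a % factor == 0:
--             factors.append(factor)
--             a //= factor
--
--     # 如果 a 不能被完全分解
--     if a != 1:
--         return 0
--
--     # 将因子由小到大排序并组合成数字
--     factors.sort()
--     result = int(''.join(map(str, factors)))
--
--     # 如果组合的结果超过了 32 位有符号整型的范围，则返回 0
--     return result if result < 2**31 else 0
-- ===== SOURCE B (Python) =====
-- def minimum_factorization(a: int) -> int:
--     if a == 1:
--         return 1
--     res, base = 0, 1
--     for factor in range(9, 1, -1):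
--         while a % factor == 0:
--             a //= factor
--             res = factor * base + res
--             base *= 10
--     if a != 1:
--         return 0
--     return res if res < 2**31 else 0
-- ===== Notes on version B (the rewrite author's own statement) =====
-- stated objective: simpler
-- what changed: B drops A's factor list, sort and str/int round-trip: dividing factors out from 9 down to 2, each factor is prepended arithmetically (res = factor*base + res; base *= 10), which yields the ascending digit number directly.
import Mathlib
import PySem

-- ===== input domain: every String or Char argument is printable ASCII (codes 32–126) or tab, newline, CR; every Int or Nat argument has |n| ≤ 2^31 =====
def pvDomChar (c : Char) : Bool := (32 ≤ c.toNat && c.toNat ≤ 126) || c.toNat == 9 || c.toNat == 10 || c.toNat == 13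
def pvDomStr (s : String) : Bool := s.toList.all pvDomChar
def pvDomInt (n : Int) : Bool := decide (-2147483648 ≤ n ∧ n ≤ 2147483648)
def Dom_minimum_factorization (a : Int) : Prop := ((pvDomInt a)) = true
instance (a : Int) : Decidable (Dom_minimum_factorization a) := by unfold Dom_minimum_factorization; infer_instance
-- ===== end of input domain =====

-- B replaces A's factor list + sort + str/int round-trip by arithmetic accumulation of the
-- ascending digit number inside the division loop (objective: simpler).

-- termination helper, cited by the two loop ports in their decreasing_by
theorem pvFloordivNatAbsLt (f a : Int) (hf : 1 < f) (ha : a ≠ 0)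
    (hm : PySem.Int.mod a f = 0) : (PySem.Int.floordiv a f).natAbs < a.natAbs := by
  obtain ⟨k, hk⟩ := (PySem.Int.mod_eq_zero_iff_dvd a f).mp hm
  have hfd : PySem.Int.floordiv a f = a / f := PySem.Int.floordiv_eq_ediv_of_pos (by omega)
  subst hk
  rw [hfd, Int.mul_ediv_cancel_left _ (by omega : f ≠ 0)]
  have hk0 : k.natAbs ≠ 0 := by
    intro h; apply ha; simp [Int.natAbs_eq_zero] at h; simp [h]
  have hf2 : 2 ≤ f.natAbs := by omega
  calc k.natAbs < 2 * k.natAbs := by omega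
    _ ≤ f.natAbs * k.natAbs := Nat.mul_le_mul_right _ hf2
    _ = (f * k).natAbs := (Int.natAbs_mul f k).symm

-- ===== PORT A =====
-- the inner 'while a % factor == 0: factors.append(factor); a //= factor'
-- (the '1 < f ∧ a ≠ 0' part of the guard only makes the recursion total in Lean; it always
-- holds whenever the Python loop body runs on an input where Python terminates)
def divLoopA (f : Int) (facs : List Int) (a : Int) : List Int × Int :=
  if h : 1 < f ∧ a ≠ 0 ∧ PySem.Int.mod a f = 0 then
    divLoopA f (facs ++ [f]) (PySem.Int.floordiv a f)
  else (facs, a)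
termination_by a.natAbs
decreasing_by exact pvFloordivNatAbsLt f a h.1 h.2.1 h.2.2

-- hand port of int(s): PySem.Int.ofStr?'s digit parser is a private definition of the prelude
-- (not citable in proofs), so the decimal parse is transcribed by hand; it is exact for the
-- strings this program passes to int(), namely non-empty ASCII digit strings
-- (''.join of the sorted single-digit factors; the a == 1 guard keeps the list non-empty)
def pyIntOfDigits (cs : List Char) : Int :=
  cs.foldl (fun r c => 10 * r + ((c.toNat : Int) - 48)) 0

def minimum_factorization (a : Int) : Int :=
  if a = 1 then 1
  else
    -- for factor in range(9, 1, -1): while a % factor == 0: …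
    let st := (PySem.List.pyRange 9 1 (-1)).foldl (fun st f => divLoopA f st.1 st.2) (([] : List Int), a)
    if st.2 ≠ 1 then 0
    else
      -- factors.sort(); result = int(''.join(map(str, factors)))
      let sortedFacs := PySem.List.sorted st.1 (fun x => x) false
      let s := PySem.Chars.join [] (sortedFacs.map PySem.Int.toChars)
      let result := pyIntOfDigits s
      if result < 2147483648 then result else 0

-- ===== PORT B =====
-- the inner 'while a % factor == 0: a //= factor; res = factor*base + res; base *= 10'
-- (same totality-guard remark as for divLoopA)
def divLoopB (f a res base : Int) : Int × Int × Int :=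
  if h : 1 < f ∧ a ≠ 0 ∧ PySem.Int.mod a f = 0 then
    divLoopB f (PySem.Int.floordiv a f) (f * base + res) (base * 10)
  else (a, res, base)
termination_by a.natAbs
decreasing_by exact pvFloordivNatAbsLt f a h.1 h.2.1 h.2.2

def minimum_factorization_alt (a : Int) : Int :=
  if a = 1 then 1
  else
    let st := (PySem.List.pyRange 9 1 (-1)).foldl (fun st f => divLoopB f st.1 st.2.1 st.2.2) (a, 0, 1)
    if st.1 ≠ 1 then 0
    else if st.2.1 < 2147483648 then st.2.1 else 0

-- ===== PRECONDITION & SPEC =====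
def Spec_minimum_factorization (a : Int) (out : Int) : Prop := out = minimum_factorization_alt a
instance (a : Int) (out : Int) : Decidable (Spec_minimum_factorization a out) := by
  unfold Spec_minimum_factorization; infer_instance

-- ===== CLAIM (what is proved, stated in full; the proofs are below) =====
def Claim_equal_minimum_factorization : Prop :=
  ∀ (a : Int), Dom_minimum_factorization a → Spec_minimum_factorization a (minimum_factorization a)

-- ===== LEMMAS AND PROOFS =====

-- the value of a digit list read as a decimal number (most significant digit first)
def valD (ds : List Int) : Int := ds.foldl (fun r d => 10 * r + d) 0

theorem valD_from (ds : List Int) : ∀ r : Int,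
    ds.foldl (fun r d => 10 * r + d) r = r * 10 ^ ds.length + valD ds := by
  induction ds with
  | nil => intro r; simp [valD]
  | cons d ds ih =>
    intro r
    have h1 : valD (d :: ds) = (10 * 0 + d) * 10 ^ ds.length + valD ds := ih (10 * 0 + d)
    rw [List.foldl_cons, ih (10 * r + d), h1, List.length_cons]
    ring

theorem valD_append (xs ys : List Int) :
    valD (xs ++ ys) = valD xs * 10 ^ ys.length + valD ys := by
  simp only [valD, List.foldl_append]
  rw [valD_from]
  rfl

-- the accumulator of divLoopA is just prepended to the factors found from ([], a)
theorem divLoopA_append (f a : Int) (facs : List Int) :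
    divLoopA f facs a = (facs ++ (divLoopA f [] a).1, (divLoopA f [] a).2) := by
  generalize hN : a.natAbs = N
  induction N using Nat.strong_induction_on generalizing a facs with
  | _ N ih =>
    subst hN
    conv_lhs => rw [divLoopA]
    conv_rhs => rw [divLoopA]
    split_ifs with hg
    · have hlt : (PySem.Int.floordiv a f).natAbs < a.natAbs :=
        pvFloordivNatAbsLt f a hg.1 hg.2.1 hg.2.2
      rw [ih _ hlt _ (facs ++ [f]) rfl, ih _ hlt _ ([] ++ [f]) rfl]
      simp
    · simp

-- every factor collected by divLoopA is f itself
theorem divLoopA_replicate (f a : Int) :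
    (divLoopA f [] a).1 = List.replicate (divLoopA f [] a).1.length f := by
  rw [List.eq_replicate_length]
  generalize hN : a.natAbs = N
  induction N using Nat.strong_induction_on generalizing a with
  | _ N ih =>
    subst hN
    intro b hb
    rw [divLoopA] at hb
    split_ifs at hb with hg
    · rw [divLoopA_append] at hb
      rcases List.mem_append.mp hb with h | h
      · simpa using h
      · exact ih _ (pvFloordivNatAbsLt f a hg.1 hg.2.1 hg.2.2) _ rfl b h
    · simp at hb

-- one factor's while-loop: B's arithmetic state in terms of A's factor list
theorem divLoopB_eq (f a : Int) : ∀ res base : Int,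
    divLoopB f a res base =
      ((divLoopA f [] a).2,
       valD (divLoopA f [] a).1 * base + res,
       base * 10 ^ (divLoopA f [] a).1.length) := by
  generalize hN : a.natAbs = N
  induction N using Nat.strong_induction_on generalizing a with
  | _ N ih =>
    subst hN
    intro res base
    conv_lhs => rw [divLoopB]
    conv_rhs => rw [divLoopA]
    split_ifs with hg
    · have hlt : (PySem.Int.floordiv a f).natAbs < a.natAbs :=
        pvFloordivNatAbsLt f a hg.1 hg.2.1 hg.2.2
      rw [ih _ hlt _ rfl, divLoopA_append f (PySem.Int.floordiv a f) ([] ++ [f])]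
      have hrep := divLoopA_replicate f (PySem.Int.floordiv a f)
      set Y := (divLoopA f [] (PySem.Int.floordiv a f)).1 with hY
      have h1 : f :: Y = Y ++ [f] := by
        conv_lhs => rw [hrep]
        conv_rhs => rw [hrep]
        rw [← List.replicate_succ, List.replicate_succ']
      have hv : valD (f :: Y) = 10 * valD Y + f := by
        rw [h1, valD_append]; simp [valD]; ring
      simp only [List.nil_append, List.singleton_append, Prod.mk.injEq]
      refine ⟨trivial, ?_, ?_⟩
      · rw [hv]; ring
      · rw [List.length_cons]; ring
    · simp [valD]

-- the A-side fold over the factor range, accumulator prepended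
theorem foldA_append (fs : List Int) : ∀ p : List Int × Int,
    fs.foldl (fun st f => divLoopA f st.1 st.2) p =
      (p.1 ++ (fs.foldl (fun st f => divLoopA f st.1 st.2) (([] : List Int), p.2)).1,
       (fs.foldl (fun st f => divLoopA f st.1 st.2) (([] : List Int), p.2)).2) := by
  induction fs with
  | nil => intro p; simp
  | cons f fs ih =>
    intro p
    simp only [List.foldl_cons]
    rw [ih (divLoopA f p.1 p.2), ih (divLoopA f [] p.2)]
    rw [divLoopA_append f p.2 p.1]
    simp [List.append_assoc]

-- B's whole fold in terms of A's: same final a, res = value of the reversed factor list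
theorem foldB_eq (fs : List Int) : ∀ (a res base : Int),
    fs.foldl (fun st f => divLoopB f st.1 st.2.1 st.2.2) (a, res, base) =
      ((fs.foldl (fun st f => divLoopA f st.1 st.2) (([] : List Int), a)).2,
       valD (fs.foldl (fun st f => divLoopA f st.1 st.2) (([] : List Int), a)).1.reverse * base + res,
       base * 10 ^ (fs.foldl (fun st f => divLoopA f st.1 st.2) (([] : List Int), a)).1.length) := by
  induction fs with
  | nil => intro a res base; simp [valD]
  | cons f fs ih =>
    intro a res base
    simp only [List.foldl_cons]
    rw [divLoopB_eq f a res base, ih, foldA_append fs (divLoopA f [] a)]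
    have hrep := divLoopA_replicate f a
    set X := (divLoopA f [] a).1 with hX
    simp only [Prod.mk.injEq]
    refine ⟨trivial, ?_, ?_⟩
    · rw [List.reverse_append, valD_append]
      have hXr : X.reverse = X := by rw [hrep]; exact List.reverse_replicate
      rw [hXr]
      ring
    · rw [List.length_append]
      ring

-- every collected factor is an element of the iterated range
theorem mem_foldA (fs : List Int) : ∀ (a x : Int),
    x ∈ (fs.foldl (fun st f => divLoopA f st.1 st.2) (([] : List Int), a)).1 → x ∈ fs := by
  induction fs with
  | nil => intro a x h; simp at h
  | cons f fs ih =>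
    intro a x h
    simp only [List.foldl_cons] at h
    rw [foldA_append fs (divLoopA f [] a)] at h
    rcases List.mem_append.mp h with h | h
    · have := divLoopA_replicate f a
      rw [this] at h
      simp only [List.mem_replicate] at h
      simp [h.2]
    · exact List.mem_cons_of_mem _ (ih _ _ h)

-- iterating a strictly decreasing factor list yields a non-increasing factor list
theorem foldA_pairwise (fs : List Int) (hfs : fs.Pairwise (· > ·)) : ∀ (a : Int),
    ((fs.foldl (fun st f => divLoopA f st.1 st.2) (([] : List Int), a)).1).Pairwise (· ≥ ·) := by
  induction fs with
  | nil => intro a; simp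
  | cons f fs ih =>
    intro a
    rcases List.pairwise_cons.mp hfs with ⟨hf, hfs'⟩
    simp only [List.foldl_cons]
    rw [foldA_append fs (divLoopA f [] a)]
    rw [List.pairwise_append]
    refine ⟨?_, ih hfs' _, ?_⟩
    · rw [divLoopA_replicate f a, List.pairwise_replicate]
      right; exact le_refl f
    · intro x hx y hy
      have hxf : x = f := by
        rw [divLoopA_replicate f a] at hx
        exact (List.mem_replicate.mp hx).2
      have hyf : y ∈ fs := mem_foldA fs _ y hy
      have := hf y hyf
      omega

-- A's join-then-parse of a single-digit list is its decimal value
theorem parse_digits (ds : List Int) (h : ∀ d ∈ ds, 1 < d ∧ d ≤ 9) :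
    pyIntOfDigits (PySem.Chars.join [] (ds.map PySem.Int.toChars)) = valD ds := by
  have hmap : ds.map PySem.Int.toChars
      = (ds.map (fun d => Char.ofNat (48 + d.toNat))).map (fun c => [c]) := by
    rw [List.map_map]
    refine List.map_congr_left (fun d hd => ?_)
    obtain ⟨h1, h2⟩ := h d hd
    interval_cases d <;> decide
  rw [hmap, PySem.Chars.join_nil_singletons]
  unfold pyIntOfDigits valD
  rw [List.foldl_map]
  refine PySem.List.foldl_congr_mem _ _ _ _ (fun acc d hd => ?_)
  obtain ⟨h1, h2⟩ := h d hd
  have : ((Char.ofNat (48 + d.toNat)).toNat : Int) - 48 = d := by interval_cases d <;> decide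
  rw [this]

-- the two ports agree on every input (even a = 0, where both Lean loops stop via the guard)
theorem portA_eq_portB (a : Int) : minimum_factorization a = minimum_factorization_alt a := by
  unfold minimum_factorization minimum_factorization_alt
  by_cases h1 : a = 1
  · simp [h1]
  · rw [if_neg h1, if_neg h1]
    have hFS : PySem.List.pyRange 9 1 (-1) = [9, 8, 7, 6, 5, 4, 3, 2] := by decide
    rw [hFS, foldB_eq]
    set F := (([9, 8, 7, 6, 5, 4, 3, 2] : List Int).foldl
      (fun st f => divLoopA f st.1 st.2) (([] : List Int), a)) with hF
    simp only [mul_one, add_zero]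
    have hpw : (F.1).Pairwise (· ≥ ·) := foldA_pairwise _ (by decide) a
    have hsort : PySem.List.sorted F.1 (fun x => x) false = F.1.reverse :=
      PySem.List.sorted_id_eq_of_perm_of_pairwise _ _ (List.reverse_perm _)
        ((List.pairwise_reverse).mpr hpw)
    have hdig : ∀ d ∈ F.1.reverse, 1 < d ∧ d ≤ 9 := by
      intro d hd
      have hm := mem_foldA _ a d (List.mem_reverse.mp hd)
      simp only [List.mem_cons, List.not_mem_nil, or_false] at hm
      omega
    rw [hsort, parse_digits _ hdig]

-- ===== VERDICT (by name: the statement is the Claim_ definition above) =====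
theorem minimum_factorization_spec : Claim_equal_minimum_factorization := by
  intro a _hdom
  unfold Spec_minimum_factorization
  exact portA_eq_portB a
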